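-- pv_equiv track=rewrite | github.com/GooseGustin/pygame-connect-four | connect_four.py | trimDiags
-- ===== SOURCE A (Python) =====
-- def trimDiags(array):
--     ''' sort arrays and remove empty arrays and repeated arrays '''
--     sorted_array = [sorted(arr) for arr in array]
--     # Remove empty lists
--     for n in sorted_array[:]:
--         if not n:
--             sorted_array.remove(n)
--     # Remove list repititions
--     for n in sorted_array[:]:
--         while sorted_array.count(n)>1 or not (sorted_array.count(n)):
--             sorted_array.remove(n)
--     return sorted(sorted_array)
-- ===== SOURCE B (Python) =====
-- def trimDiags(array):
--     ''' sort arrays and remove empty arrays and repeated arrays '''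
--     s = sorted(sorted(arr) for arr in array if arr)
--     result = []
--     for n in s:
--         if not result or result[-1] != n:
--             result.append(n)
--     return result
-- ===== Notes on version B (the rewrite author's own statement) =====
-- stated objective: faster
-- what changed: Replaces A's remove-empties pass plus a count/remove-until-unique dedup loop followed by a final sort with: filter-and-sort once globally, then remove duplicates in a single adjacent-compare pass over the sorted list.
import Mathlib
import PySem

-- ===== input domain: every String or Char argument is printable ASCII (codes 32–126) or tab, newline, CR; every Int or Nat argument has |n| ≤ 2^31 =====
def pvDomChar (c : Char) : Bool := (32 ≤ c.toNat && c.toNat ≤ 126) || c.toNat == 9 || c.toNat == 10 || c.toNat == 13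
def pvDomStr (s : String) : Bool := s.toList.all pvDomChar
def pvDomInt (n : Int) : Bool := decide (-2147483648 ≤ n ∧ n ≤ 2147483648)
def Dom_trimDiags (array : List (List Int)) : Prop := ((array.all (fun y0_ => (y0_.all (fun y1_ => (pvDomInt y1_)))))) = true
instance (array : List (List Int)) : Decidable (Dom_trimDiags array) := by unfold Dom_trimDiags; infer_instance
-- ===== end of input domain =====

-- B replaces A's remove-empties pass and quadratic count/remove dedup loop (then sort) by one
-- global sort of the filtered sorted subarrays followed by a single adjacent-compare dedup pass.

-- sorted(xs) on a list of lists (Python's lexicographic list order = List.Lex (· < ·), the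
-- order of Mathlib's LinearOrder (List Int); the instance is pinned explicitly)
def pvSortOuter (xs : List (List Int)) : List (List Int) :=
  @PySem.List.sorted (List Int) (List Int) _ (@LinearOrder.toDecidableLT _ List.instLinearOrder)
    xs (fun x => x) false

-- ===== PORT A =====
-- 'if not n: sorted_array.remove(n)' — remove? none (Python's ValueError) is unreachable here
def pvRemoveEmptyStep (cur : List (List Int)) (n : List Int) : List (List Int) :=
  if n = [] then
    match PySem.List.remove? cur n with
    | some l => l
    | none => cur
  else cur

-- 'while sorted_array.count(n)>1 or not (sorted_array.count(n)): sorted_array.remove(n)'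
-- (the count = 0 entry, where Python's remove would raise, is unreachable; remove? none returns cur)
def pvWhileRem (cur : List (List Int)) (n : List Int) : List (List Int) :=
  if PySem.List.count cur n > 1 ∨ PySem.List.count cur n = 0 then
    match h : PySem.List.remove? cur n with
    | some l => pvWhileRem l n
    | none => cur
  else cur
termination_by cur.length
decreasing_by
  have hm : n ∈ cur := by
    by_contra hn
    rw [(PySem.List.remove?_eq_none_iff cur n).mpr hn] at h
    cases h
  rw [PySem.List.remove?_eq_some_erase cur n hm] at h
  injection h with h
  subst h
  have := List.length_erase_of_mem hm
  have : 0 < cur.length := List.length_pos_of_mem hm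
  omega

def trimDiags (array : List (List Int)) : List (List Int) :=
  let sortedArray := array.map (fun arr => PySem.List.sorted arr (fun x => x) false)
  let noEmpty := sortedArray.foldl pvRemoveEmptyStep sortedArray
  let deduped := noEmpty.foldl pvWhileRem noEmpty
  pvSortOuter deduped

-- ===== PORT B =====
-- 'if not result or result[-1] != n: result.append(n)'
def pvAppendNewStep (result : List (List Int)) (n : List Int) : List (List Int) :=
  if result = [] ∨ result.getLast? ≠ some n then result ++ [n] else result

def trimDiags_alt (array : List (List Int)) : List (List Int) :=
  let s := pvSortOuter
    ((array.filter (fun arr => decide (arr ≠ []))).map (fun arr => PySem.List.sorted arr (fun x => x) false))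
  s.foldl pvAppendNewStep []

-- ===== PRECONDITION & SPEC =====
def Spec_trimDiags (array : List (List Int)) (out : List (List Int)) : Prop := out = trimDiags_alt array
instance (array : List (List Int)) (out : List (List Int)) : Decidable (Spec_trimDiags array out) := by unfold Spec_trimDiags; infer_instance

-- ===== CLAIM (what is proved, stated in full; the proofs are below) =====
def Claim_equal_trimDiags : Prop := ∀ (array : List (List Int)), Dom_trimDiags array → Spec_trimDiags array (trimDiags array)

-- ===== LEMMAS AND PROOFS =====

-- strict version of the (Mathlib) lexicographic order on List Int, as ≤ plus ≠
def pvLtNe (a b : List Int) : Prop := a ≤ b ∧ a ≠ b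

-- erasing an occurrence of [] commutes with filtering on a predicate false at []
lemma pv_filter_erase_nil (p : List Int → Bool) (hp : p [] = false) (l : List (List Int)) :
    ((l.erase []).filter p) = l.filter p := by
  induction l with
  | nil => simp
  | cons x xs ih =>
    by_cases hx : x = []
    · subst hx; simp [List.erase_cons, List.filter_cons, hp]
    · simp [List.erase_cons, hx, List.filter_cons, ih]

-- A's remove-empties loop computes filter (· ≠ [])
lemma pv_removeEmpty_loop (todo : List (List Int)) :
    ∀ cur : List (List Int), List.count [] cur ≤ List.count [] todo →
      todo.foldl pvRemoveEmptyStep cur = cur.filter (fun a => decide (a ≠ [])) := by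
  induction todo with
  | nil =>
    intro cur h
    have h0 : List.count ([] : List Int) cur = 0 := by simpa using h
    have : ∀ a ∈ cur, (fun a => decide (a ≠ ([] : List Int))) a = true := by
      intro a ha
      have : a ≠ [] := by
        rintro rfl
        exact absurd (List.count_pos_iff.mpr ha) (by omega)
      simpa using this
    exact (List.filter_eq_self.mpr this).symm
  | cons n t ih =>
    intro cur h
    by_cases hn : n = []
    · subst hn
      by_cases hmem : ([] : List Int) ∈ cur
      · have hrem : PySem.List.remove? cur [] = some (cur.erase []) :=
          PySem.List.remove?_eq_some_erase cur [] hmem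
        have hcnt : List.count ([] : List Int) (cur.erase []) ≤ List.count ([] : List Int) t := by
          have he := List.count_erase_self (a := ([] : List Int)) (l := cur)
          rw [List.count_cons_self] at h
          omega
        simp only [List.foldl_cons, pvRemoveEmptyStep, hrem, if_true]
        rw [ih _ hcnt, pv_filter_erase_nil _ (by simp)]
      · have hrem : PySem.List.remove? cur ([] : List Int) = none :=
          (PySem.List.remove?_eq_none_iff cur []).mpr hmem
        have hcnt : List.count ([] : List Int) cur ≤ List.count ([] : List Int) t := by
          have : List.count ([] : List Int) cur = 0 := by
            simpa using List.count_eq_zero.mpr hmem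
          omega
        simp only [List.foldl_cons, pvRemoveEmptyStep, hrem, if_true]
        exact ih _ hcnt
    · have hcnt : List.count ([] : List Int) cur ≤ List.count ([] : List Int) t := by
        rwa [List.count_cons_of_ne hn] at h
      simp only [List.foldl_cons, pvRemoveEmptyStep, if_neg hn]
      exact ih _ hcnt

-- count characterisation of A's inner while-loop
lemma pv_whileRem_count (cur : List (List Int)) (n : List Int) :
    ∀ x, List.count x (pvWhileRem cur n) =
      if x = n then min 1 (List.count n cur) else List.count x cur := by
  induction cur using pvWhileRem.induct (n := n) with
  | case1 c hcond l h ih =>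
    intro x
    have hm : n ∈ c := by
      by_contra hn
      rw [(PySem.List.remove?_eq_none_iff c n).mpr hn] at h
      cases h
    have hl : l = c.erase n := by
      rw [PySem.List.remove?_eq_some_erase c n hm] at h
      exact (Option.some.inj h).symm
    subst hl
    have hpos : 0 < List.count n c := List.count_pos_iff.mpr hm
    have hgt : 1 < List.count n c := by
      rcases hcond with hc | hc
      · simpa [PySem.List.count_eq] using hc
      · simp [PySem.List.count_eq] at hc; omega
    rw [pvWhileRem, if_pos hcond, h]
    rw [ih x]
    by_cases hx : x = n
    · subst hx
      simp [List.count_erase_self]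
      omega
    · simp [hx, List.count_erase_of_ne hx]
  | case2 c hcond h =>
    intro x
    have hn : n ∉ c := (PySem.List.remove?_eq_none_iff c n).mp h
    have h0 : List.count n c = 0 := List.count_eq_zero.mpr hn
    rw [pvWhileRem, if_pos hcond, h]
    by_cases hx : x = n
    · subst hx; simp [h0]
    · simp [hx]
  | case3 c hcond =>
    intro x
    have h1 : List.count n c = 1 := by
      simp [PySem.List.count_eq] at hcond
      omega
    rw [pvWhileRem, if_neg hcond]
    by_cases hx : x = n
    · subst hx; simp [h1]
    · simp [hx]

-- count characterisation of A's dedup fold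
lemma pv_dedup_fold_count (todo : List (List Int)) :
    ∀ (cur : List (List Int)) (x : List Int),
      List.count x (todo.foldl pvWhileRem cur) =
        if x ∈ todo then min 1 (List.count x cur) else List.count x cur := by
  induction todo with
  | nil => intro cur x; simp
  | cons n t ih =>
    intro cur x
    simp only [List.foldl_cons]
    rw [ih]
    rw [pv_whileRem_count]
    by_cases hxt : x ∈ t
    · by_cases hxn : x = n <;> simp [hxt, hxn]
    · by_cases hxn : x = n
      · subst hxn; simp [hxt]
      · simp [hxt, hxn, List.mem_cons]

-- in a strictly increasing list every element is ≤ the last one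
lemma pv_le_getLast {l : List (List Int)} {a m : List Int}
    (hp : l.Pairwise pvLtNe) (ha : a ∈ l) (hm : l.getLast? = some m) : a ≤ m := by
  induction l with
  | nil => cases ha
  | cons x xs ih =>
    cases xs with
    | nil =>
      simp at hm ha
      subst hm; subst ha; exact le_refl _
    | cons y ys =>
      have hm' : (y :: ys).getLast? = some m := by
        simpa [List.getLast?_cons_cons] using hm
      have hmem : m ∈ y :: ys := by
        obtain ⟨l', hl'⟩ := List.getLast?_eq_some_iff.mp hm'
        rw [hl']; simp
      rcases List.mem_cons.mp ha with rfl | ha'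
      · exact ((List.pairwise_cons.mp hp).1 m hmem).1
      · exact ih (List.pairwise_cons.mp hp).2 ha' hm'

-- B's adjacent-dedup fold: strictly increasing output with membership acc ∪ todo
lemma pv_appendNew_fold (todo : List (List Int)) :
    ∀ acc : List (List Int), acc.Pairwise pvLtNe → todo.Pairwise (· ≤ ·) →
      (∀ a ∈ acc, ∀ t ∈ todo, a ≤ t) →
      (todo.foldl pvAppendNewStep acc).Pairwise pvLtNe ∧
      (∀ x, x ∈ todo.foldl pvAppendNewStep acc ↔ x ∈ acc ∨ x ∈ todo) := by
  induction todo with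
  | nil => intro acc hacc _ _; exact ⟨hacc, by simp⟩
  | cons n t ih =>
    intro acc hacc hchain hle
    have hchain' : t.Pairwise (· ≤ ·) := (List.pairwise_cons.mp hchain).2
    have hnle : ∀ u ∈ t, n ≤ u := (List.pairwise_cons.mp hchain).1
    simp only [List.foldl_cons]
    by_cases hbr : acc = [] ∨ acc.getLast? ≠ some n
    · have hstep : pvAppendNewStep acc n = acc ++ [n] := by
        unfold pvAppendNewStep; exact if_pos hbr
      rw [hstep]
      have hlt : ∀ a ∈ acc, pvLtNe a n := by
        intro a ha
        have hne : acc ≠ [] := by rintro rfl; cases ha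
        obtain ⟨m, hm⟩ : ∃ m, acc.getLast? = some m := by
          cases hg : acc.getLast? with
          | none => exact absurd (List.getLast?_eq_none_iff.mp hg) hne
          | some m => exact ⟨m, rfl⟩
        have ham : a ≤ m := pv_le_getLast hacc ha hm
        have hmn : m ≤ n := by
          have : m ∈ acc := by
            obtain ⟨l', hl'⟩ := List.getLast?_eq_some_iff.mp hm
            rw [hl']; simp
          exact hle m this n (by simp)
        have hmne : m ≠ n := by
          rcases hbr with hb | hb
          · exact absurd hb hne
          · rintro rfl; exact hb hm
        refine ⟨le_trans ham hmn, ?_⟩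
        rintro rfl
        exact hmne (le_antisymm hmn ham)
      have hacc' : (acc ++ [n]).Pairwise pvLtNe := by
        rw [List.pairwise_append]
        exact ⟨hacc, by simp, by intro a ha b hb; simp at hb; subst hb; exact hlt a ha⟩
      have hle' : ∀ a ∈ acc ++ [n], ∀ u ∈ t, a ≤ u := by
        intro a ha u hu
        rcases List.mem_append.mp ha with ha' | ha'
        · exact hle a ha' u (by simp [hu])
        · simp at ha'; subst ha'; exact hnle u hu
      obtain ⟨hp, hmem⟩ := ih (acc ++ [n]) hacc' hchain' hle'
      refine ⟨hp, fun x => ?_⟩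
      rw [hmem x]
      simp [List.mem_append, or_assoc, or_comm, or_left_comm]
    · have hstep : pvAppendNewStep acc n = acc := by
        unfold pvAppendNewStep; exact if_neg hbr
      rw [hstep]
      push_neg at hbr
      obtain ⟨hne, hlast⟩ := hbr
      have hnacc : n ∈ acc := by
        obtain ⟨l', hl'⟩ := List.getLast?_eq_some_iff.mp hlast
        rw [hl']; simp
      have hle' : ∀ a ∈ acc, ∀ u ∈ t, a ≤ u := by
        intro a ha u hu; exact hle a ha u (by simp [hu])
      obtain ⟨hp, hmem⟩ := ih acc hacc hchain' hle'
      refine ⟨hp, fun x => ?_⟩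
      rw [hmem x]
      constructor
      · rintro (hx | hx)
        · exact Or.inl hx
        · exact Or.inr (by simp [hx])
      · rintro (hx | hx)
        · exact Or.inl hx
        · rcases List.mem_cons.mp hx with rfl | hx'
          · exact Or.inl hnacc
          · exact Or.inr hx'

-- ===== VERDICT (by name: the statement is the Claim_ definition above) =====
theorem trimDiags_spec : Claim_equal_trimDiags := by
  intro array _
  unfold Spec_trimDiags trimDiags trimDiags_alt
  simp only []
  set f : List Int → List Int := fun arr => PySem.List.sorted arr (fun x => x) false with hf
  set m : List (List Int) := array.map f with hmdef
  have h1 : m.foldl pvRemoveEmptyStep m = m.filter (fun a => decide (a ≠ [])) :=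
    pv_removeEmpty_loop m m le_rfl
  set s : List (List Int) := m.filter (fun a => decide (a ≠ [])) with hsdef
  -- B's filtered-mapped base list coincides with s
  have hbase : (array.filter (fun arr => decide (arr ≠ []))).map f = s := by
    rw [hsdef, hmdef, List.filter_map]
    congr 1
    apply List.filter_congr
    intro arr _
    simp only [Function.comp]
    have : f arr = [] ↔ arr = [] := PySem.List.sorted_eq_nil_iff arr _ _
    simp [this]
  rw [h1]
  set L : List (List Int) := s.foldl pvWhileRem s with hLdef
  have hLcount : ∀ x, List.count x L = min 1 (List.count x s) := by
    intro x
    rw [hLdef, pv_dedup_fold_count]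
    by_cases hx : x ∈ s
    · simp [hx]
    · simp [hx, List.count_eq_zero.mpr hx]
  have hLnodup : L.Nodup := by
    rw [List.nodup_iff_count_le_one]
    intro x; rw [hLcount]; omega
  have hLmem : ∀ x, x ∈ L ↔ x ∈ s := by
    intro x
    rw [← List.count_pos_iff, ← List.count_pos_iff (l := s), hLcount]
    omega
  set s' : List (List Int) := pvSortOuter s with hs'def
  have hchain : s'.Pairwise (· ≤ ·) := by
    rw [hs'def]; unfold pvSortOuter
    exact PySem.List.sorted_pairwise s (fun x => x)
  obtain ⟨hRpw, hRmem⟩ := pv_appendNew_fold s' [] (by simp) hchain (by simp)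
  set R : List (List Int) := s'.foldl pvAppendNewStep [] with hRdef
  have hRnodup : R.Nodup := hRpw.imp (fun h => h.2)
  have hperm : R.Perm L := by
    rw [List.perm_ext_iff_of_nodup hRnodup hLnodup]
    intro x
    rw [hLmem x, hRmem x]
    have hx : x ∈ s' ↔ x ∈ s := by
      rw [hs'def]; unfold pvSortOuter
      exact @PySem.List.mem_sorted (List Int) (List Int) _ (@LinearOrder.toDecidableLT _ List.instLinearOrder) s (fun x => x) false x
    simp [hx]
  rw [hbase, ← hs'def, ← hRdef]
  unfold pvSortOuter
  exact PySem.List.sorted_id_eq_of_perm_of_pairwise L R hperm (hRpw.imp (fun h => h.1))
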